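-- pv_equiv track=rewrite | github.com/HormyAJP/advent_of_code_2024 | 15.py | move_object_left
-- ===== SOURCE A (Python) =====
-- def move_object_left(grid, object, test_only=False):
--     object_type = grid[object[1]][object[0]]
--     assert(object_type in ["@", "O", "[", "]"])
--     if grid[object[1]][object[0]-1] == ".":
--         if not test_only:
--             grid[object[1]][object[0]-1] = object_type
--             grid[object[1]][object[0]] = "."
--         return True
--     elif grid[object[1]][object[0]-1] == "#":
--         return False
--     elif grid[object[1]][object[0]-1] in ["O", "[", "]"]:
--         if move_object_left(grid, (object[0]-1, object[1]), test_only):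
--             if not test_only:
--                 assert(grid[object[1]][object[0]-1] == ".")
--                 grid[object[1]][object[0]-1] = object_type
--                 grid[object[1]][object[0]] = "."
--             return True
--         return False
--     assert(False)
-- ===== SOURCE B (Python) =====
-- def move_object_left(grid, object, test_only=False):
--     x, y = object
--     object_type = grid[y][x]
--     assert object_type in ["@", "O", "[", "]"]
--     p = x - 1
--     while grid[y][p] in ["O", "[", "]"]:
--         p -= 1
--     blocker = grid[y][p]
--     if blocker == ".":
--         if not test_only:
--             vals = [grid[y][i] for i in range(p + 1, x + 1)]
--             for k, i in enumerate(range(p, x)):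
--                 grid[y][i] = vals[k]
--             grid[y][x] = "."
--         return True
--     if blocker == "#":
--         return False
--     assert False
-- ===== Notes on version B (the rewrite author's own statement) =====
-- stated objective: simpler
-- what changed: Replaces A's recursion (one call frame per pushed cell, re-reading and re-asserting the object type at every level) by a single iterative leftward scan for the first non-pushable cell followed by one block shift of the run.
import Mathlib
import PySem

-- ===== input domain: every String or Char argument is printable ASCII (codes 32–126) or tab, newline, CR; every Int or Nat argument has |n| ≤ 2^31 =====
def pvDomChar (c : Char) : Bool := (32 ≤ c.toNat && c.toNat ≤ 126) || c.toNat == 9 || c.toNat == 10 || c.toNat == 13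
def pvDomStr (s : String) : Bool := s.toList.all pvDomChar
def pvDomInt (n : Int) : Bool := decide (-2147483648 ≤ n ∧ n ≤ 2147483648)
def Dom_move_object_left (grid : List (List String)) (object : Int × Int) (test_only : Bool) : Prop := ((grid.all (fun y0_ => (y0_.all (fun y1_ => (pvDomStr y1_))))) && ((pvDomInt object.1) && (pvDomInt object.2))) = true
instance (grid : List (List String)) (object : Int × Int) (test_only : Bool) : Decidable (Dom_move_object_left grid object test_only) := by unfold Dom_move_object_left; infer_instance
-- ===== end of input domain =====

-- B replaces A's recursion by a single iterative leftward scan for the blocking cell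
-- followed by one block shift (objective: simpler); the equivalence proved is about the
-- RETURN value only — both Pythons mutate `grid` in place identically when not test_only.


-- ===== PORT A =====
-- fuel is only a totality guard: the Python recursion steps x down by 1 and raises
-- (= none here) once x-1 leaves the negative-wrap index range, so pvFuel is never reached.
def pvFuel (grid : List (List String)) : Nat :=
  2 * grid.foldl (fun a r => a + r.length) 0 + 2

def molA : Nat → List (List String) → Int → Int → Bool → Option Bool
  | 0, _, _, _, _ => none
  | fuel+1, grid, x, y, test_only =>
    match PySem.List.pyGet? grid y with
    | none => none
    | some row =>
      match PySem.List.pyGet? row x with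
      | none => none
      | some object_type =>
        if object_type == "@" || object_type == "O" || object_type == "[" || object_type == "]" then
          match PySem.List.pyGet? row (x - 1) with
          | none => none
          | some c =>
            if c == "." then some true
            else if c == "#" then some false
            else if c == "O" || c == "[" || c == "]" then
              match molA fuel grid (x - 1) y test_only with
              | none => none
              | some b => if b then some true else some false
            else none
        else none

def move_object_left (grid : List (List String)) (object : Int × Int) (test_only : Bool) : Bool :=
  (molA (pvFuel grid) grid object.1 object.2 test_only).getD false

-- ===== PORT B =====
def pushableB (c : String) : Bool := c == "O" || c == "[" || c == "]"

-- the `while grid[y][p] in ["O","[","]"]: p -= 1` loop of Source B, fuel as totality guard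
def scanB : Nat → List String → Int → Option Bool
  | 0, _, _ => none
  | fuel+1, row, p =>
    match PySem.List.pyGet? row p with
    | none => none
    | some c =>
      if pushableB c then scanB fuel row (p - 1)
      else if c == "." then some true
      else if c == "#" then some false
      else none

def move_object_left_alt (grid : List (List String)) (object : Int × Int) (test_only : Bool) : Bool :=
  match PySem.List.pyGet? grid object.2 with
  | none => false
  | some row =>
    match PySem.List.pyGet? row object.1 with
    | none => false
    | some object_type =>
      if object_type == "@" || object_type == "O" || object_type == "[" || object_type == "]" then
        (scanB (pvFuel grid) row (object.1 - 1)).getD false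
      else false

-- ===== PRECONDITION & SPEC =====
def pvPushP (row : List String) (p : Int) : Bool :=
  let c := (PySem.List.pyGet? row p).getD "?"
  c == "O" || c == "[" || c == "]"

-- Pre_ = the inputs on which the Python A returns normally: the object cell exists
-- (Python negative-wrap indexing) and holds "@"/"O"/"["/"]", and scanning the cells at
-- python indices object[0]-1, object[0]-2, … (down to -len, i.e. with negative wrap),
-- the first cell that is not "O"/"["/"]" exists and is "." or "#"; everything else
-- makes A raise IndexError or AssertionError.
def pvPreB (grid : List (List String)) (object : Int × Int) : Bool :=
  match PySem.List.pyGet? grid object.2 with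
  | none => false
  | some row =>
    match PySem.List.pyGet? row object.1 with
    | none => false
    | some object_type =>
      (object_type == "@" || object_type == "O" || object_type == "[" || object_type == "]") &&
      match (PySem.List.pyRange (object.1 - 1) (-(row.length : Int) - 1) (-1)).find?
              (fun p => !(pvPushP row p)) with
      | some p =>
        (PySem.List.pyGet? row p).getD "?" == "." || (PySem.List.pyGet? row p).getD "?" == "#"
      | none => false

def Pre_move_object_left (grid : List (List String)) (object : Int × Int) (test_only : Bool) : Prop :=
  pvPreB grid object = true

instance (grid : List (List String)) (object : Int × Int) (test_only : Bool) : Decidable (Pre_move_object_left grid object test_only) := by unfold Pre_move_object_left; infer_instance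

def pvWitness_move_object_left : List (List String) × (Int × Int) × Bool :=
  ([[".", "O", "@"]], ((2 : Int), (0 : Int)), false)

def Spec_move_object_left (grid : List (List String)) (object : Int × Int) (test_only : Bool) (out : Bool) : Prop := out = move_object_left_alt grid object test_only
instance (grid : List (List String)) (object : Int × Int) (test_only : Bool) (out : Bool) : Decidable (Spec_move_object_left grid object test_only out) := by unfold Spec_move_object_left; infer_instance

-- ===== CLAIM (what is proved, stated in full; the proofs are below) =====
def Claim_equal_move_object_left : Prop := ∀ (grid : List (List String)) (object : Int × Int) (test_only : Bool), Dom_move_object_left grid object test_only → Pre_move_object_left grid object test_only → Spec_move_object_left grid object test_only (move_object_left grid object test_only)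

-- ===== LEMMAS AND PROOFS =====

-- A's recursion at x equals B's scan started at x-1, fuel for fuel, whenever the object
-- cell at x exists and is an allowed type (the recursion re-checks exactly that).
lemma molA_eq_scanB (f : Nat) :
    ∀ (grid : List (List String)) (row : List String) (x y : Int) (t : Bool) (objt : String),
    PySem.List.pyGet? grid y = some row →
    PySem.List.pyGet? row x = some objt →
    (objt == "@" || objt == "O" || objt == "[" || objt == "]") = true →
    molA f grid x y t = scanB f row (x - 1) := by
  induction f with
  | zero => intros; rfl
  | succ f ih =>
    intro grid row x y t objt hg hr hty
    simp only [molA, scanB, hg, hr, hty, if_true]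
    cases hc : PySem.List.pyGet? row (x - 1) with
    | none => rfl
    | some c =>
      by_cases hdot : c = "."
      · subst hdot; rfl
      · by_cases hhash : c = "#"
        · subst hhash; rfl
        · by_cases hpush : (c == "O" || c == "[" || c == "]") = true
          · have hrec := ih grid row (x - 1) y t c hg hc (by
              rcases Bool.or_eq_true_iff.mp hpush with h | h
              · rcases Bool.or_eq_true_iff.mp h with h | h <;> simp [h]
              · simp [h])
            simp only [beq_iff_eq, hdot, hhash, if_false, hpush, if_true, pushableB, hrec]
            cases scanB f row (x - 1 - 1) with
            | none => rfl
            | some b => cases b <;> rfl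
          · simp only [beq_iff_eq, hdot, hhash, if_false, hpush, pushableB]
            rfl

-- ===== VERDICT (by name: the statement is the Claim_ definition above) =====
theorem move_object_left_spec : Claim_equal_move_object_left := by
  unfold Claim_equal_move_object_left
  intro grid object t _ _
  unfold Spec_move_object_left move_object_left move_object_left_alt
  have hfuel : pvFuel grid = (2 * grid.foldl (fun a r => a + r.length) 0 + 1) + 1 := by
    unfold pvFuel; ring
  cases hg : PySem.List.pyGet? grid object.2 with
  | none => rw [hfuel]; simp [molA, hg]
  | some row =>
    cases hr : PySem.List.pyGet? row object.1 with
    | none => rw [hfuel]; simp [molA, hg, hr]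
    | some objt =>
      cases hty : (objt == "@" || objt == "O" || objt == "[" || objt == "]") with
      | true =>
        rw [molA_eq_scanB (pvFuel grid) grid row object.1 object.2 t objt hg hr hty]
        simp [hr, hty]
      | false => rw [hfuel]; simp [molA, hg, hr, hty]
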